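-- pv_equiv track=rewrite | github.com/zhangreny/LLMEnhanced_KGTool | Backend/api_index.py | parse_tabbed_string
-- ===== SOURCE A (Python) =====
-- def parse_tabbed_string(input_string):
--     tab_count = 0
--     rest_of_string = input_string
--     for char in input_string:
--         if char == '\t':
--             tab_count += 1
--         else:
--             break
--     rest_of_string = rest_of_string.lstrip('\t')
--     return tab_count, rest_of_string
-- ===== SOURCE B (Python) =====
-- def parse_tabbed_string(input_string):
--     rest = input_string.lstrip('\t')
--     return len(input_string) - len(rest), rest
-- ===== Notes on version B (the rewrite author's own statement) =====
-- stated objective: simpler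
-- what changed: B drops the explicit per-character counting loop with its break: it strips leading tabs once with lstrip and derives the count arithmetically as the length difference.
import Mathlib
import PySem

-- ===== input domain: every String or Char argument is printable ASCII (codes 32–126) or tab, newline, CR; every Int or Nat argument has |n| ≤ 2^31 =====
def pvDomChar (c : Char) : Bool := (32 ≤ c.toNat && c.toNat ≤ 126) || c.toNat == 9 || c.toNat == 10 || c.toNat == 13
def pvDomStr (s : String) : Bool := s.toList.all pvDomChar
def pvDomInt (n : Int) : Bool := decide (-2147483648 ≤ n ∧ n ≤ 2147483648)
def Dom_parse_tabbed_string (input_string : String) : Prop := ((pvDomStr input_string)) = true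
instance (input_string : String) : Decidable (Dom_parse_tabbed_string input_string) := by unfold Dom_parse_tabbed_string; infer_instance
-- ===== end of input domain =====

-- B replaces A's explicit counting loop (with break) by one lstrip and a length difference: simpler decomposition, same O(n) cost.


-- ===== PORT A =====
-- A's for-loop over the characters with break: accumulate tab_count until the first non-tab.
def pvTabLoopA : List Char → Int → Int
  | [], tab_count => tab_count
  | c :: cs, tab_count => if c == '\t' then pvTabLoopA cs (tab_count + 1) else tab_count

-- hand port of str.lstrip('\t'): drop leading tab characters (exact: a single explicit strip set)
def pvLstripTabs : List Char → List Char
  | [] => []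
  | c :: cs => if c == '\t' then pvLstripTabs cs else c :: cs

def parse_tabbed_string (input_string : String) : Int × String :=
  (pvTabLoopA input_string.toList 0, String.ofList (pvLstripTabs input_string.toList))

-- ===== PORT B =====
-- B: rest = input_string.lstrip('\t') (same hand port of lstrip('\t'), via dropWhile), count = len - len(rest).
def parse_tabbed_string_alt (input_string : String) : Int × String :=
  let rest := String.ofList (input_string.toList.dropWhile (· == '\t'))
  ((input_string.toList.length : Int) - (rest.toList.length : Int), rest)

-- ===== PRECONDITION & SPEC =====
def Spec_parse_tabbed_string (input_string : String) (out : Int × String) : Prop := out = parse_tabbed_string_alt input_string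
instance (input_string : String) (out : Int × String) : Decidable (Spec_parse_tabbed_string input_string out) := by unfold Spec_parse_tabbed_string; infer_instance

-- ===== CLAIM (what is proved, stated in full; the proofs are below) =====
def Claim_equal_parse_tabbed_string : Prop := ∀ (input_string : String), Dom_parse_tabbed_string input_string → Spec_parse_tabbed_string input_string (parse_tabbed_string input_string)

-- ===== LEMMAS AND PROOFS =====
theorem pvLstripTabs_eq_dropWhile (l : List Char) :
    pvLstripTabs l = l.dropWhile (· == '\t') := by
  induction l with
  | nil => rfl
  | cons c cs ih =>
    simp only [pvLstripTabs, List.dropWhile]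
    by_cases h : c == '\t' <;> simp [h, ih]

theorem pvTabLoopA_eq (l : List Char) (acc : Int) :
    pvTabLoopA l acc = acc + ((l.length : Int) - ((l.dropWhile (· == '\t')).length : Int)) := by
  induction l generalizing acc with
  | nil => simp [pvTabLoopA]
  | cons c cs ih =>
    simp only [pvTabLoopA, List.dropWhile]
    by_cases h : c == '\t'
    · simp only [h, if_true, ih, List.length_cons]
      push_cast
      ring
    · simp only [h, List.length_cons]
      push_cast
      ring

-- ===== VERDICT (by name: the statement is the Claim_ definition above) =====
theorem parse_tabbed_string_spec : Claim_equal_parse_tabbed_string := by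
  intro s _
  unfold Spec_parse_tabbed_string parse_tabbed_string parse_tabbed_string_alt
  simp [pvLstripTabs_eq_dropWhile, pvTabLoopA_eq, String.toList_ofList]
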